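-- pv_equiv track=rewrite | github.com/AsilbekMelikov/advent-code | 19-day/index.py | calculate
-- ===== SOURCE A (Python) =====
-- def calculate(stripes, groups):
--     total = 0
--     caching = {}
--     def find_sequences(sequence:str):
--         if sequence in caching:
--             return caching[sequence]
--         total = 0
--         if not sequence:
--             return 1
--
--         for stripe in stripes:
--             if sequence.startswith(stripe):
--                 total += find_sequences(sequence[len(stripe):])
--         caching[sequence] = total
--         return total
--
--
--     for group in groups:
--         total += find_sequences(group)
--     return total
-- ===== SOURCE B (Python) =====
-- def calculate(stripes, groups):
--     cnt = {}
--     maxlen = 0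
--     for st in stripes:
--         cnt[st] = cnt.get(st, 0) + 1
--         if len(st) > maxlen:
--             maxlen = len(st)
--     total = 0
--     for s in groups:
--         n = len(s)
--         dp = [0] * (n + 1)
--         dp[n] = 1
--         for i in reversed(range(n)):
--             acc = 0
--             for L in range(1, min(maxlen, n - i) + 1):
--                 c = cnt.get(s[i:i + L])
--                 if c:
--                     acc += c * dp[i + L]
--             dp[i] = acc
--         total += dp[0]
--     return total
-- ===== Notes on version B (the rewrite author's own statement) =====
-- stated objective: faster
-- what changed: Replaced the recursive memoized closure (dict cache keyed by suffix strings, inner scan over all stripes per call) by a bottom-up DP array per group whose inner loop scans only prefix lengths 1..maxlen against a count dict built once from stripes; an empty pattern in stripes makes A recurse until RecursionError on any non-empty group, so Pre_ excludes that (crash) case while still admitting empty-stripe inputs whose groups are all empty.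
import Mathlib
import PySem

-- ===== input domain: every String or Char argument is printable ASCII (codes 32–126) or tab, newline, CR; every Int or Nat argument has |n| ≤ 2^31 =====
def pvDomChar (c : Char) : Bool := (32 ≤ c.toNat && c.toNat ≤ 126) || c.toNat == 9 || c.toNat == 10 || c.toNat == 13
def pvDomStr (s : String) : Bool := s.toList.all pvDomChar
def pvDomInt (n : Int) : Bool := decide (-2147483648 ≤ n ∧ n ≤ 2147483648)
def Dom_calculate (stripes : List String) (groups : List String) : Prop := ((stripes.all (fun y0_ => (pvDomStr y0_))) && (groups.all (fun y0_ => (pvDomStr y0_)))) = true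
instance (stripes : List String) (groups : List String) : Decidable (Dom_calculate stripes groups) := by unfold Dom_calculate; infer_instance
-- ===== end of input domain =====

-- B replaces A's memoized recursive closure by a bottom-up DP array per group, with the
-- stripes pre-indexed once in a count dict so each cell scans prefix lengths instead of all
-- stripes (measured faster in a timing run); equivalence is about the return value only.

-- ===== PORT A =====
-- find_sequences, transliterated over List Char (sequence.toList); the cache dict is threaded
-- explicitly.  Python's unbounded recursion is given fuel |sequence|+1, which suffices on
-- every input Pre_ admits (each recursive call under '' ∉ stripes strictly shortens the
-- sequence); outside Pre_ Python raises RecursionError and nothing is claimed.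
def findSeq (stripes : List String) : Nat → List Char → PySem.Dict (List Char) Int → Int × PySem.Dict (List Char) Int
  | 0, _, cache => (0, cache)
  | fuel+1, seq, cache =>
    match cache.get? seq with
    | some v => (v, cache)
    | none =>
      if seq = [] then (1, cache)
      else
        let r := stripes.foldl
          (fun (p : Int × PySem.Dict (List Char) Int) stripe =>
            if PySem.Chars.startswith seq stripe.toList then
              let q := findSeq stripes fuel (seq.drop stripe.toList.length) p.2
              (p.1 + q.1, q.2)
            else p)
          (0, cache)
        (r.1, r.2.insert seq r.1)

def calculate (stripes : List String) (groups : List String) : Int :=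
  (groups.foldl
    (fun (p : Int × PySem.Dict (List Char) Int) group =>
      let q := findSeq stripes (group.toList.length + 1) group.toList p.2
      (p.1 + q.1, q.2))
    (0, PySem.Dict.empty)).1

-- ===== PORT B =====
-- bottom-up DP for one group: dp has length n+1, dp[n]=1, indices filled from n-1 down to 0;
-- the stripe multiset is pre-indexed once as a count dict, so each cell scans prefix lengths
-- 1..maxlen instead of all stripes.  cnt.get(s[i:i+L]) is cnt.get? (String.ofList ((cs.drop i).take L))
-- — exact for 0 ≤ i and i + L ≤ n (the range bound guarantees it); range(1, min(maxlen, n-i)+1)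
-- is List.range' 1 (min maxlen (n-i)); dp[i+L] is read only for L ≤ n-i, so getD's default is
-- never used.
def calcGroup (cnt : PySem.Dict String Int) (maxlen : Nat) (s : String) : Int :=
  let cs := s.toList
  let n := cs.length
  let dp0 := (List.replicate (n+1) (0:Int)).set n 1
  let dp := (List.range n).reverse.foldl
    (fun (dp : List Int) i =>
      dp.set i ((List.range' 1 (min maxlen (n - i))).foldl
        (fun (acc : Int) L =>
          match cnt.get? (String.ofList ((cs.drop i).take L)) with
          | none => acc
          | some c => if c ≠ 0 then acc + c * dp.getD (i + L) 0 else acc)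
        0))
    dp0
  dp.getD 0 0

def calculate_alt (stripes : List String) (groups : List String) : Int :=
  let cnt := stripes.foldl
    (fun (d : PySem.Dict String Int) st => d.insert st (d.getD st 0 + 1)) PySem.Dict.empty
  let maxlen := stripes.foldl
    (fun (m : Nat) st => if st.toList.length > m then st.toList.length else m) 0
  groups.foldl (fun (total : Int) s => total + calcGroup cnt maxlen s) 0

-- ===== PRECONDITION & SPEC =====
-- Pre_ excludes exactly the inputs where A raises RecursionError: an empty string in stripes
-- together with some non-empty group makes find_sequences recurse on an unchanged argument.
def Pre_calculate (stripes : List String) (groups : List String) : Prop :=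
  "" ∈ stripes → ∀ g ∈ groups, g = ""
instance (stripes : List String) (groups : List String) : Decidable (Pre_calculate stripes groups) := by unfold Pre_calculate; infer_instance

def pvWitness_calculate : List String × List String := (["a", "ab", "b"], ["aab", "ba"])

def Spec_calculate (stripes : List String) (groups : List String) (out : Int) : Prop := out = calculate_alt stripes groups
instance (stripes : List String) (groups : List String) (out : Int) : Decidable (Spec_calculate stripes groups out) := by unfold Spec_calculate; infer_instance

-- ===== CLAIM (what is proved, stated in full; the proofs are below) =====
def Claim_equal_calculate : Prop := ∀ (stripes : List String) (groups : List String), Dom_calculate stripes groups → Pre_calculate stripes groups → Spec_calculate stripes groups (calculate stripes groups)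

-- ===== LEMMAS AND PROOFS =====

-- the specification function: number of decompositions, by fuel
def waysF (stripes : List String) : Nat → List Char → Int
  | 0, _ => 0
  | f+1, cs =>
    if cs = [] then 1
    else stripes.foldl
      (fun a st => if st.toList <+: cs then a + waysF stripes f (cs.drop st.toList.length) else a) 0

def W (stripes : List String) (cs : List Char) : Int := waysF stripes (cs.length + 1) cs

lemma waysF_stable (stripes : List String) (hne : "" ∉ stripes) :
    ∀ f g cs, cs.length < f → cs.length < g → waysF stripes f cs = waysF stripes g cs := by
  intro f
  induction f using Nat.strong_induction_on with
  | _ f ih =>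
    intro g cs hf hg
    match f, g with
    | f'+1, g'+1 =>
      by_cases hnil : cs = []
      · simp [waysF, hnil]
      · have hlc : 1 ≤ cs.length := by
          cases cs with
          | nil => exact absurd rfl hnil
          | cons a l => simp
        simp only [waysF, if_neg hnil]
        apply PySem.List.foldl_congr_mem
        intro acc st hst
        by_cases hp : st.toList <+: cs
        · have hlen : 1 ≤ st.toList.length := by
            rcases Nat.eq_zero_or_pos st.toList.length with h0 | h1
            · exact absurd (String.toList_eq_nil_iff.mp (List.length_eq_zero_iff.mp h0)) (by
                intro h; exact hne (h ▸ hst))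
            · exact h1
          have hd : (cs.drop st.toList.length).length < f' := by
            have := List.length_drop (l := cs) (i := st.toList.length)
            omega
          have hd' : (cs.drop st.toList.length).length < g' := by
            have := List.length_drop (l := cs) (i := st.toList.length)
            omega
          rw [if_pos hp, if_pos hp,
            ih f' (Nat.lt_succ_self _) g' (cs.drop st.toList.length) hd hd']
        · rw [if_neg hp, if_neg hp]

lemma W_nil (stripes : List String) : W stripes [] = 1 := by simp [W, waysF]

lemma W_unfold (stripes : List String) (hne : "" ∉ stripes) (cs : List Char) (h : cs ≠ []) :
    W stripes cs = stripes.foldl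
      (fun a st => if st.toList <+: cs then a + W stripes (cs.drop st.toList.length) else a) 0 := by
  have hlc : 1 ≤ cs.length := by
    cases cs with
    | nil => exact absurd rfl h
    | cons a l => simp
  unfold W
  rw [waysF, if_neg h]
  apply PySem.List.foldl_congr_mem
  intro acc st hst
  by_cases hp : st.toList <+: cs
  · have hlen : 1 ≤ st.toList.length := by
      rcases Nat.eq_zero_or_pos st.toList.length with h0 | h1
      · exact absurd (String.toList_eq_nil_iff.mp (List.length_eq_zero_iff.mp h0)) (by
          intro hh; exact hne (hh ▸ hst))
      · exact h1
    rw [if_pos hp, if_pos hp,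
      waysF_stable stripes hne cs.length ((cs.drop st.toList.length).length + 1) _
        (by have := List.length_drop (l := cs) (i := st.toList.length); omega)
        (Nat.lt_succ_self _)]
  · rw [if_neg hp, if_neg hp]

def goodCache (stripes : List String) (c : PySem.Dict (List Char) Int) : Prop :=
  ∀ k v, c.get? k = some v → v = W stripes k

lemma findSeq_correct (stripes : List String) (hne : "" ∉ stripes) :
    ∀ f cs c, cs.length < f → goodCache stripes c →
      (findSeq stripes f cs c).1 = W stripes cs ∧ goodCache stripes (findSeq stripes f cs c).2 := by
  intro f
  induction f using Nat.strong_induction_on with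
  | _ f ih =>
    intro cs c hf hc
    match f with
    | f'+1 =>
      simp only [findSeq]
      cases hget : c.get? cs with
      | some v =>
        exact ⟨hc cs v hget, hc⟩
      | none =>
        by_cases hnil : cs = []
        · subst hnil
          simp [W_nil]
          exact hc
        · simp only [if_neg hnil]
          have hlc : 1 ≤ cs.length := by
            cases cs with
            | nil => exact absurd rfl hnil
            | cons a l => simp
          have hfold : ∀ (l : List String), (∀ st ∈ l, st ∈ stripes) →
              ∀ (a : Int) (c' : PySem.Dict (List Char) Int), goodCache stripes c' →
              (l.foldl (fun (p : Int × PySem.Dict (List Char) Int) stripe =>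
                  if PySem.Chars.startswith cs stripe.toList then
                    (p.1 + (findSeq stripes f' (cs.drop stripe.toList.length) p.2).1,
                     (findSeq stripes f' (cs.drop stripe.toList.length) p.2).2)
                  else p) (a, c')).1
                = l.foldl (fun a st => if st.toList <+: cs then a + W stripes (cs.drop st.toList.length) else a) a
              ∧ goodCache stripes (l.foldl (fun (p : Int × PySem.Dict (List Char) Int) stripe =>
                  if PySem.Chars.startswith cs stripe.toList then
                    (p.1 + (findSeq stripes f' (cs.drop stripe.toList.length) p.2).1,
                     (findSeq stripes f' (cs.drop stripe.toList.length) p.2).2)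
                  else p) (a, c')).2 := by
            intro l
            induction l with
            | nil => intro _ a c' hc'; exact ⟨rfl, hc'⟩
            | cons st tl ihl =>
              intro hsub a c' hc'
              have hst : st ∈ stripes := hsub st (List.mem_cons_self)
              by_cases hp : st.toList <+: cs
              · have hsw : PySem.Chars.startswith cs st.toList = true :=
                  (PySem.Chars.startswith_iff cs st.toList).mpr hp
                have hlen : 1 ≤ st.toList.length := by
                  rcases Nat.eq_zero_or_pos st.toList.length with h0 | h1
                  · exact absurd (String.toList_eq_nil_iff.mp (List.length_eq_zero_iff.mp h0)) (by
                      intro hh; exact hne (hh ▸ hst))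
                  · exact h1
                have hd : (cs.drop st.toList.length).length < f' := by
                  have := List.length_drop (l := cs) (i := st.toList.length)
                  omega
                obtain ⟨hq1, hq2⟩ := ih f' (Nat.lt_succ_self _) (cs.drop st.toList.length) c' hd hc'
                simp only [List.foldl_cons, if_pos hsw, if_pos hp, hq1]
                exact ihl (fun x hx => hsub x (List.mem_cons_of_mem _ hx)) _ _ hq2
              · have hsw : PySem.Chars.startswith cs st.toList = false := by
                  rw [← Bool.not_eq_true, PySem.Chars.startswith_iff cs st.toList]; exact hp
                simp only [List.foldl_cons, hsw, Bool.false_eq_true, if_false, if_neg hp]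
                exact ihl (fun x hx => hsub x (List.mem_cons_of_mem _ hx)) a c' hc'
          obtain ⟨h1, h2⟩ := hfold stripes (fun _ h => h) 0 c hc
          refine ⟨by rw [h1]; exact (W_unfold stripes hne cs hnil).symm, ?_⟩
          intro k v hkv
          by_cases hk : k = cs
          · subst hk
            rw [PySem.Dict.get?_insert_self] at hkv
            injection hkv with hv
            rw [← hv, h1]
            exact (W_unfold stripes hne k hnil).symm
          · rw [PySem.Dict.get?_insert, if_neg hk] at hkv
            exact h2 k v hkv

lemma sum_single (g : Nat → Int) (L0 : Nat) :
    ∀ xs : List Nat, xs.Nodup → L0 ∈ xs →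
      (xs.map (fun L => if L = L0 then g L else 0)).sum = g L0 := by
  intro xs
  induction xs with
  | nil => intro _ h; cases h
  | cons a tl ih =>
    intro hnd hmem
    rw [List.map_cons, List.sum_cons]
    rcases List.mem_cons.mp hmem with rfl | h
    · rw [if_pos rfl]
      have hz : (tl.map (fun L => if L = L0 then g L else 0)).sum = 0 := by
        apply List.sum_eq_zero
        intro x hx
        obtain ⟨L, hL, rfl⟩ := List.mem_map.mp hx
        rw [if_neg]
        rintro rfl
        exact (List.nodup_cons.mp hnd).1 hL
      rw [hz, add_zero]
    · have hne2 : a ≠ L0 := by rintro rfl; exact (List.nodup_cons.mp hnd).1 h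
      rw [if_neg hne2, ih (List.nodup_cons.mp hnd).2 h, zero_add]

lemma indicator_sum (u : List Char) (st : String) (hst : st.toList ≠ []) (M : Nat)
    (hM : st.toList.length ≤ M) (g : Nat → Int) :
    ((List.range' 1 (min M u.length)).map
        (fun L => (if u.take L = st.toList then (1:Int) else 0) * g L)).sum
      = if st.toList <+: u then g st.toList.length else 0 := by
  have hlen0 : 1 ≤ st.toList.length := List.length_pos_iff.mpr hst
  by_cases hp : st.toList <+: u
  · rw [if_pos hp]
    have hle : st.toList.length ≤ u.length := hp.length_le
    have hmem : st.toList.length ∈ List.range' 1 (min M u.length) := by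
      rw [List.mem_range'_1]; omega
    have hfun : ∀ L ∈ List.range' 1 (min M u.length),
        (if u.take L = st.toList then (1:Int) else 0) * g L
          = (if L = st.toList.length then g L else 0) := by
      intro L hL
      rw [List.mem_range'_1] at hL
      by_cases hq : u.take L = st.toList
      · have hLl : L = st.toList.length := by
          have h1 : (u.take L).length = L := by
            rw [List.length_take]; omega
          rw [hq] at h1; omega
        rw [if_pos hq, hLl, if_pos rfl, one_mul]
      · have hLn : L ≠ st.toList.length := by
          intro h
          apply hq
          rw [h]
          exact (List.prefix_iff_eq_take.mp hp).symm
        rw [if_neg hq, if_neg hLn, zero_mul]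
    rw [List.map_eq_map_iff.mpr hfun]
    exact sum_single g st.toList.length _ (List.nodup_range' 1) hmem
  · rw [if_neg hp]
    apply List.sum_eq_zero
    intro x hx
    obtain ⟨L, hL, rfl⟩ := List.mem_map.mp hx
    by_cases hq : u.take L = st.toList
    · exact absurd (hq ▸ List.take_prefix L u) hp
    · rw [if_neg hq, zero_mul]

lemma count_rung (M : Nat) (u : List Char) (g : Nat → Int) :
    ∀ l : List String, "" ∉ l → (∀ st ∈ l, st.toList.length ≤ M) →
      ((List.range' 1 (min M u.length)).map
          (fun L => (l.count (String.ofList (u.take L)) : Int) * g L)).sum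
        = (l.map (fun st => if st.toList <+: u then g st.toList.length else 0)).sum := by
  intro l
  induction l with
  | nil => intro _ _; simp
  | cons st tl ih =>
    intro hne hM
    have hne' : "" ∉ tl := fun h => hne (List.mem_cons_of_mem _ h)
    have hst0 : st ≠ "" := fun h => hne (h ▸ List.mem_cons_self)
    have hstl : st.toList ≠ [] := fun h => hst0 (String.toList_eq_nil_iff.mp h)
    have hM' : ∀ x ∈ tl, x.toList.length ≤ M := fun x hx => hM x (List.mem_cons_of_mem _ hx)
    have hMst : st.toList.length ≤ M := hM st List.mem_cons_self
    rw [List.map_cons, List.sum_cons]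
    have hsplit : ∀ L ∈ List.range' 1 (min M u.length),
        ((st :: tl).count (String.ofList (u.take L)) : Int) * g L
          = (if u.take L = st.toList then (1:Int) else 0) * g L
            + (tl.count (String.ofList (u.take L)) : Int) * g L := by
      intro L _
      rw [List.count_cons]
      by_cases hL : u.take L = st.toList
      · have h1 : (st == String.ofList (u.take L)) = true :=
          beq_iff_eq.mpr (String.ofList_eq.mpr hL).symm
        rw [h1, if_pos rfl, if_pos hL]
        push_cast
        ring
      · have h1 : (st == String.ofList (u.take L)) = false := by
          rw [beq_eq_false_iff_ne]
          intro hh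
          exact hL (String.ofList_eq.mp hh.symm)
        rw [h1, if_neg hL]
        simp
    rw [List.map_eq_map_iff.mpr hsplit,
      PySem.List.sum_map_add_int _ (fun L => (if u.take L = st.toList then (1:Int) else 0) * g L)
        (fun L => (tl.count (String.ofList (u.take L)) : Int) * g L),
      indicator_sum u st hstl M hMst g, ih hne' hM']

lemma foldl_if_sum (u : List Char) (l : List String) (f : String → Int) (init : Int) :
    l.foldl (fun a st => if st.toList <+: u then a + f st else a) init
      = init + (l.map (fun st => if st.toList <+: u then f st else 0)).sum := by
  rw [← PySem.List.foldl_add l (fun st => if st.toList <+: u then f st else 0) init]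
  apply PySem.List.foldl_congr_mem
  intro acc st _
  by_cases hp : st.toList <+: u
  · rw [if_pos hp, if_pos hp]
  · rw [if_neg hp, if_neg hp, add_zero]

lemma maxlen_ge : ∀ (l : List String) (m0 : Nat),
    m0 ≤ l.foldl (fun (m : Nat) st => if st.toList.length > m then st.toList.length else m) m0 ∧
    ∀ st ∈ l, st.toList.length ≤
      l.foldl (fun (m : Nat) st => if st.toList.length > m then st.toList.length else m) m0 := by
  intro l
  induction l with
  | nil => exact fun m0 => ⟨le_refl _, by simp⟩
  | cons a tl ih =>
    intro m0
    rw [List.foldl_cons]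
    obtain ⟨h1, h2⟩ := ih (if a.toList.length > m0 then a.toList.length else m0)
    have hm0 : m0 ≤ (if a.toList.length > m0 then a.toList.length else m0) := by split <;> omega
    have ha : a.toList.length ≤ (if a.toList.length > m0 then a.toList.length else m0) := by
      split <;> omega
    refine ⟨le_trans hm0 h1, ?_⟩
    intro st hst
    rcases List.mem_cons.mp hst with rfl | h
    · exact le_trans ha h1
    · exact h2 st h

lemma dpFoldInv (stripes : List String) (hne : "" ∉ stripes)
    (cnt : PySem.Dict String Int) (maxlen : Nat)
    (hcnt : ∀ k, cnt.getD k 0 = (stripes.count k : Int))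
    (hM : ∀ st ∈ stripes, st.toList.length ≤ maxlen) (cs : List Char) :
    ∀ j, j ≤ cs.length → ∀ dp : List Int, dp.length = cs.length + 1 →
      (∀ i, j ≤ i → i ≤ cs.length → dp.getD i 0 = W stripes (cs.drop i)) →
      ((List.range j).reverse.foldl
         (fun (dp : List Int) i => dp.set i ((List.range' 1 (min maxlen (cs.length - i))).foldl
            (fun (acc : Int) L =>
              match cnt.get? (String.ofList ((cs.drop i).take L)) with
              | none => acc
              | some c => if c ≠ 0 then acc + c * dp.getD (i + L) 0 else acc)
            0))
         dp).length = cs.length + 1 ∧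
      ∀ i, i ≤ cs.length →
        ((List.range j).reverse.foldl
           (fun (dp : List Int) i => dp.set i ((List.range' 1 (min maxlen (cs.length - i))).foldl
              (fun (acc : Int) L =>
                match cnt.get? (String.ofList ((cs.drop i).take L)) with
                | none => acc
                | some c => if c ≠ 0 then acc + c * dp.getD (i + L) 0 else acc)
              0))
           dp).getD i 0 = W stripes (cs.drop i) := by
  intro j
  induction j with
  | zero =>
    intro _ dp hlen hinv
    exact ⟨by simpa using hlen, fun i hi => by simpa using hinv i (Nat.zero_le i) hi⟩
  | succ j ihj =>
    intro hj dp hlen hinv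
    rw [List.range_succ, List.reverse_append, List.reverse_singleton, List.singleton_append,
      List.foldl_cons]
    have hjn : j < cs.length := hj
    have hulen : (cs.drop j).length = cs.length - j := by simp
    have hdropnil : cs.drop j ≠ [] := by
      intro h
      rw [h] at hulen
      simp at hulen
      omega
    -- value written at index j is W (cs.drop j)
    have hrow : ((List.range' 1 (min maxlen (cs.length - j))).foldl
        (fun (acc : Int) L =>
          match cnt.get? (String.ofList ((cs.drop j).take L)) with
          | none => acc
          | some c => if c ≠ 0 then acc + c * dp.getD (j + L) 0 else acc)
        0) = W stripes (cs.drop j) := by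
      have stepA : ∀ (acc : Int), ∀ L ∈ List.range' 1 (min maxlen (cs.length - j)),
          (match cnt.get? (String.ofList ((cs.drop j).take L)) with
           | none => acc
           | some c => if c ≠ 0 then acc + c * dp.getD (j + L) 0 else acc)
            = acc + (stripes.count (String.ofList ((cs.drop j).take L)) : Int) * dp.getD (j + L) 0 := by
        intro acc L _
        have hg := hcnt (String.ofList ((cs.drop j).take L))
        rw [PySem.Dict.getD_eq_get?_getD] at hg
        cases hq : cnt.get? (String.ofList ((cs.drop j).take L)) with
        | none =>
          rw [hq] at hg
          simp only [Option.getD_none] at hg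
          simp [← hg]
        | some c =>
          rw [hq] at hg
          simp only [Option.getD_some] at hg
          show (if c ≠ 0 then acc + c * dp.getD (j + L) 0 else acc)
              = acc + (stripes.count (String.ofList ((cs.drop j).take L)) : Int) * dp.getD (j + L) 0
          by_cases hc : c = 0
          · subst hc
            simp [← hg]
          · rw [if_pos hc, hg]
      trans ((List.range' 1 (min maxlen (cs.length - j))).foldl
        (fun (a : Int) L => a + (stripes.count (String.ofList ((cs.drop j).take L)) : Int) * dp.getD (j + L) 0) 0)
      · apply PySem.List.foldl_congr_mem
        exact stepA
      rw [PySem.List.foldl_add, zero_add]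
      have hcr := count_rung maxlen (cs.drop j) (fun L => dp.getD (j + L) 0) stripes hne hM
      rw [hulen] at hcr
      rw [hcr, W_unfold stripes hne (cs.drop j) hdropnil,
        foldl_if_sum (cs.drop j) stripes
          (fun st => W stripes ((cs.drop j).drop st.toList.length)) 0, zero_add]
      congr 1
      apply List.map_eq_map_iff.mpr
      intro st hst
      by_cases hp : st.toList <+: cs.drop j
      · have hlen1 : 1 ≤ st.toList.length := by
          rcases Nat.eq_zero_or_pos st.toList.length with h0 | h1
          · exact absurd (String.toList_eq_nil_iff.mp (List.length_eq_zero_iff.mp h0)) (by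
              intro hh; exact hne (hh ▸ hst))
          · exact h1
        have hle : st.toList.length ≤ cs.length - j := by
          have := hp.length_le
          rw [hulen] at this
          exact this
        rw [if_pos hp, if_pos hp, List.drop_drop]
        exact hinv (j + st.toList.length) (by omega) (by omega)
      · rw [if_neg hp, if_neg hp]
    -- apply the induction hypothesis to the updated dp
    refine ihj (by omega) _ (by simpa using hlen) ?_
    intro i hji hin
    by_cases hij : i = j
    · subst hij
      rw [List.getD_eq_getElem?_getD, List.getElem?_set_self (by omega), Option.getD_some, hrow]
    · have : j < i := by omega
      rw [List.getD_eq_getElem?_getD, List.getElem?_set_ne (by omega),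
        ← List.getD_eq_getElem?_getD]
      exact hinv i (by omega) hin

lemma calcGroup_eq_W (stripes : List String) (hne : "" ∉ stripes)
    (cnt : PySem.Dict String Int) (maxlen : Nat)
    (hcnt : ∀ k, cnt.getD k 0 = (stripes.count k : Int))
    (hM : ∀ st ∈ stripes, st.toList.length ≤ maxlen) (s : String) :
    calcGroup cnt maxlen s = W stripes s.toList := by
  have h := dpFoldInv stripes hne cnt maxlen hcnt hM s.toList s.toList.length (le_refl _)
    ((List.replicate (s.toList.length + 1) (0 : Int)).set s.toList.length 1)
    (by simp)
    (by
      intro i hi hin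
      have hieq : i = s.toList.length := le_antisymm hin hi
      subst hieq
      rw [List.getD_eq_getElem?_getD, List.getElem?_set_self (by simp), Option.getD_some,
        List.drop_length, W_nil])
  simpa [calcGroup] using h.2 0 (Nat.zero_le _)

lemma calcGroup_empty (cnt : PySem.Dict String Int) (maxlen : Nat) :
    calcGroup cnt maxlen "" = 1 := rfl

lemma calc_fold (stripes : List String) (hne : "" ∉ stripes)
    (cnt : PySem.Dict String Int) (maxlen : Nat)
    (hcnt : ∀ k, cnt.getD k 0 = (stripes.count k : Int))
    (hM : ∀ st ∈ stripes, st.toList.length ≤ maxlen) :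
    ∀ (gs : List String) (a : Int) (c : PySem.Dict (List Char) Int), goodCache stripes c →
      (gs.foldl (fun (p : Int × PySem.Dict (List Char) Int) group =>
          let q := findSeq stripes (group.toList.length + 1) group.toList p.2
          (p.1 + q.1, q.2)) (a, c)).1
        = gs.foldl (fun total s => total + calcGroup cnt maxlen s) a := by
  intro gs
  induction gs with
  | nil => intro a c _; rfl
  | cons g tl ihg =>
    intro a c hc
    obtain ⟨hq1, hq2⟩ := findSeq_correct stripes hne (g.toList.length + 1) g.toList c
      (Nat.lt_succ_self _) hc
    simp only [List.foldl_cons]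
    rw [hq1, ← calcGroup_eq_W stripes hne cnt maxlen hcnt hM g]
    exact ihg _ _ hq2

lemma calc_fold_empty (stripes : List String) (cnt : PySem.Dict String Int) (maxlen : Nat) :
    ∀ (gs : List String), (∀ g ∈ gs, g = "") →
      ∀ (a : Int) (c : PySem.Dict (List Char) Int), c.get? [] = none →
      (gs.foldl (fun (p : Int × PySem.Dict (List Char) Int) group =>
          let q := findSeq stripes (group.toList.length + 1) group.toList p.2
          (p.1 + q.1, q.2)) (a, c)).1
        = gs.foldl (fun total s => total + calcGroup cnt maxlen s) a := by
  intro gs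
  induction gs with
  | nil => intro _ a c _; rfl
  | cons g tl ihg =>
    intro hgs a c hc
    have hg : g = "" := hgs g List.mem_cons_self
    subst hg
    have h1 : findSeq stripes (("" : String).toList.length + 1) ("" : String).toList c = (1, c) := by
      simp [findSeq, hc]
    simp only [List.foldl_cons, h1, calcGroup_empty]
    exact ihg (fun x hx => hgs x (List.mem_cons_of_mem _ hx)) _ _ hc

theorem calculate_spec : Claim_equal_calculate := by
  intro stripes groups _dom hpre
  unfold Spec_calculate calculate calculate_alt
  by_cases hne : "" ∈ stripes
  · exact calc_fold_empty stripes _ _ groups (hpre hne) 0 _ (PySem.Dict.get?_empty _)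
  · have hcnt : ∀ k, (stripes.foldl
        (fun (d : PySem.Dict String Int) st => d.insert st (d.getD st 0 + 1))
        PySem.Dict.empty).getD k 0 = (stripes.count k : Int) := by
      intro k
      rw [PySem.Dict.getD_foldl_insert_add_one]
      simp
    exact calc_fold stripes hne _ _ hcnt (maxlen_ge stripes 0).2 groups 0 _ (fun k v h => by
      rw [PySem.Dict.get?_empty] at h
      cases h)
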